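-- pv_equiv track=rewrite | github.com/TommybeStr/Social-Behavior-Simulation | data_preprocess/scripts/tools/model_evaluate.py | iter_span_char_ranges_from_user_blob
-- ===== SOURCE A (Python) =====
-- from typing import List, Dict, Any, Tuple, Optional
--
-- PSEP_TOKEN   = "<|psep|>"
--
-- def iter_span_char_ranges_from_user_blob(user_blob: str) -> List[Tuple[int, int]]:
--     spans = []
--     token = PSEP_TOKEN
--     L = len(token)
--     pos = 0
--     marks = []
--     while True:
--         i = user_blob.find(token, pos)
--         if i == -1: break
--         marks.append(i)
--         pos = i + L
--     for a, b in zip(marks[0::2], marks[1::2]):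
--         spans.append((a, b + L))
--     return spans
-- ===== SOURCE B (Python) =====
-- PSEP_TOKEN = "<|psep|>"
--
-- def iter_span_char_ranges_from_user_blob(user_blob):
--     token = PSEP_TOKEN
--     L = len(token)
--     n = len(user_blob)
--     spans = []
--     start = None
--     i = 0
--     while i <= n - L:
--         if user_blob.startswith(token, i):
--             if start is None:
--                 start = i
--             else:
--                 spans.append((start, i + L))
--                 start = None
--             i += L
--         else:
--             i += 1
--     return spans
-- ===== Notes on version B (the rewrite author's own statement) =====
-- stated objective: alternative
-- what changed: B replaces A's two-phase strategy (collect all token positions via repeated str.find restarts, then pair them by even/odd slicing and zip) with a single left-to-right index scan using startswith and a pending-start toggle that emits each (start, end) span as soon as its closing token is found.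
import Mathlib
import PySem

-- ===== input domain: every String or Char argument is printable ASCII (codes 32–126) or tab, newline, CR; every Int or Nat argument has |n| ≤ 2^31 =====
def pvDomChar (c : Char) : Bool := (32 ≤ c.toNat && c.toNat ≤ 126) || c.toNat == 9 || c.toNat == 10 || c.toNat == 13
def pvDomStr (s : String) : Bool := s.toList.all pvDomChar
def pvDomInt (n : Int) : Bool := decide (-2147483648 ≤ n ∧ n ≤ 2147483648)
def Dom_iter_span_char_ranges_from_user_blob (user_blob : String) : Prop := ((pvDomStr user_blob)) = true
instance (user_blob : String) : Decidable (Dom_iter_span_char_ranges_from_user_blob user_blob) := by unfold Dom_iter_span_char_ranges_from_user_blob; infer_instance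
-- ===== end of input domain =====

-- B replaces A's repeated str.find marks-then-zip pairing by one single left-to-right scan
-- with a pending-start toggle that emits each span as soon as its closing token is seen (objective: alternative).

-- ===== PORT A =====
-- while True: i = user_blob.find(token, pos); if i == -1: break; marks.append(i); pos = i + L
-- ported with a fuel counter (len+1) that the loop never exhausts (pos grows by L = 8 > 0 each step).
def pvAGo (s token : String) (L : Int) (fuel : Nat) (pos : Int) (marks : List Int) : List Int :=
  match fuel with
  | 0 => marks
  | f + 1 =>
    let i := PySem.Str.findFrom s token pos
    if i = -1 then marks else pvAGo s token L f (i + L) (marks ++ [i])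

def iter_span_char_ranges_from_user_blob (user_blob : String) : List (Int × Int) :=
  let token := "<|psep|>"
  let L : Int := (PySem.Str.len token : Int)
  let marks := pvAGo user_blob token L (user_blob.toList.length + 1) 0 []
  -- marks[0::2] / marks[1::2]; step 2 ≠ 0, so slice? always returns some (getD [] never fires)
  let evens := (PySem.List.slice? marks (some 0) none 2).getD []
  let odds := (PySem.List.slice? marks (some 1) none 2).getD []
  List.foldl (fun spans p => spans ++ [(p.1, p.2 + L)]) [] (evens.zip odds)

-- ===== PORT B =====
def pvTok : List Char := "<|psep|>".toList

-- while i <= n - L: if user_blob.startswith(token, i): toggle pending start / emit span; i += L else i += 1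
-- user_blob.startswith(token, i) for 0 ≤ i ≤ n is exactly: token.toList is a prefix of user_blob.toList.drop i.
def pvBGo (cs : List Char) (i : Nat) (start : Option Nat) (spans : List (Int × Int)) : List (Int × Int) :=
  if h : i + 8 ≤ cs.length then
    if PySem.Chars.startswith (cs.drop i) pvTok then
      match start with
      | none => pvBGo cs (i + 8) (some i) spans
      | some a => pvBGo cs (i + 8) none (spans ++ [((a : Int), ((i : Int) + 8))])
    else pvBGo cs (i + 1) start spans
  else spans
termination_by cs.length - i
decreasing_by all_goals omega

def iter_span_char_ranges_from_user_blob_alt (user_blob : String) : List (Int × Int) :=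
  pvBGo user_blob.toList 0 none []

-- ===== PRECONDITION & SPEC =====
def Spec_iter_span_char_ranges_from_user_blob (user_blob : String) (out : List (Int × Int)) : Prop := out = iter_span_char_ranges_from_user_blob_alt user_blob
instance (user_blob : String) (out : List (Int × Int)) : Decidable (Spec_iter_span_char_ranges_from_user_blob user_blob out) := by unfold Spec_iter_span_char_ranges_from_user_blob; infer_instance

-- ===== CLAIM (what is proved, stated in full; the proofs are below) =====
def Claim_equal_iter_span_char_ranges_from_user_blob : Prop := ∀ (user_blob : String), Dom_iter_span_char_ranges_from_user_blob user_blob → Spec_iter_span_char_ranges_from_user_blob user_blob (iter_span_char_ranges_from_user_blob user_blob)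

-- ===== LEMMAS AND PROOFS =====

-- first occurrence of pvTok at index ≥ pos, by unit steps
def pvFirstOcc (cs : List Char) (pos : Nat) : Option Nat :=
  if pvTok <+: cs.drop pos then some pos
  else if pos < cs.length then pvFirstOcc cs (pos + 1) else none
termination_by cs.length - pos

lemma pvTok_len : pvTok.length = 8 := by decide

lemma pvFirstOcc_some {cs : List Char} {pos j : Nat} (h : pvFirstOcc cs pos = some j) :
    pos ≤ j ∧ pvTok <+: cs.drop j ∧ ∀ i, pos ≤ i → i < j → ¬ pvTok <+: cs.drop i := by
  induction pos using pvFirstOcc.induct cs with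
  | case1 pos hp =>
    rw [pvFirstOcc, if_pos hp] at h
    cases h
    exact ⟨le_refl _, hp, fun i h1 h2 _ => absurd h1 (by omega)⟩
  | case2 pos hp hlt ih =>
    rw [pvFirstOcc, if_neg hp, if_pos hlt] at h
    obtain ⟨a, b, c⟩ := ih h
    exact ⟨by omega, b, fun i h1 h2 => by
      rcases Nat.eq_or_lt_of_le h1 with rfl | h1'
      · exact hp
      · exact c i h1' h2⟩
  | case3 pos hp hlt =>
    rw [pvFirstOcc, if_neg hp, if_neg hlt] at h
    cases h

lemma pvFirstOcc_none {cs : List Char} {pos : Nat} (h : pvFirstOcc cs pos = none) :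
    ∀ j, pos ≤ j → ¬ pvTok <+: cs.drop j := by
  induction pos using pvFirstOcc.induct cs with
  | case1 pos hp => rw [pvFirstOcc, if_pos hp] at h; cases h
  | case2 pos hp hlt ih =>
    rw [pvFirstOcc, if_neg hp, if_pos hlt] at h
    intro j hj
    rcases Nat.eq_or_lt_of_le hj with rfl | hj'
    · exact hp
    · exact ih h j hj'
  | case3 pos hp hlt =>
    intro j hj hpre
    have := hpre.length_le
    simp [pvTok_len] at this
    omega

lemma pvOcc_len {cs : List Char} {j : Nat} (h : pvTok <+: cs.drop j) : j + 8 ≤ cs.length := by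
  have := h.length_le
  simp [pvTok_len] at this
  omega

lemma pvFindFrom_eq (cs : List Char) (pos : Nat) (hpos : pos ≤ cs.length) :
    PySem.Chars.findFrom cs pvTok (pos : Int) none =
      (match pvFirstOcc cs pos with | some j => (j : Int) | none => -1) := by
  cases hocc : pvFirstOcc cs pos with
  | none =>
    rw [(PySem.Chars.findFrom_natCast_eq_neg_one_iff cs pvTok pos hpos)]
    intro hinf
    obtain ⟨j, hj⟩ := (PySem.Chars.exists_prefix_drop_iff_isIn pvTok (cs.drop pos)).mpr
      ((PySem.Chars.isIn_iff_infix pvTok (cs.drop pos)).mpr hinf)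
    rw [List.drop_drop] at hj
    exact pvFirstOcc_none hocc _ (by omega) hj
  | some j =>
    obtain ⟨hpj, hpre, hmin⟩ := pvFirstOcc_some hocc
    have hne : PySem.Chars.findFrom cs pvTok (pos : Int) none ≠ -1 := by
      rw [Ne, PySem.Chars.findFrom_natCast_eq_neg_one_iff cs pvTok pos hpos, not_not]
      refine ((PySem.Chars.isIn_iff_infix pvTok (cs.drop pos)).mp
        ((PySem.Chars.exists_prefix_drop_iff_isIn pvTok (cs.drop pos)).mp ⟨j - pos, ?_⟩))
      rw [List.drop_drop, show pos + (j - pos) = j from by omega]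
      exact hpre
    obtain ⟨h1, h2, h3⟩ := PySem.Chars.findFrom_natCast_spec cs pvTok pos hpos hne
    have hv0 : (0 : Int) ≤ PySem.Chars.findFrom cs pvTok (pos : Int) none :=
      le_trans (by positivity) h1
    have hvj : (PySem.Chars.findFrom cs pvTok (pos : Int) none).toNat = j := by
      rcases lt_trichotomy (PySem.Chars.findFrom cs pvTok (pos : Int) none).toNat j with hlt | heq | hgt
      · exact absurd h2 (hmin _ (by omega) hlt)
      · exact heq
      · exact absurd hpre (h3 j hpj hgt)
    show PySem.Chars.findFrom cs pvTok (pos : Int) none = (j : Int)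
    omega

-- A's greedy marks, abstractly
def pvMarks (cs : List Char) (pos : Nat) : List Nat :=
  match h : pvFirstOcc cs pos with
  | none => []
  | some j => j :: pvMarks cs (j + 8)
termination_by cs.length + 8 - pos
decreasing_by
  have := pvFirstOcc_some h
  have := pvOcc_len this.2.1
  omega

lemma pvMarks_eq (cs : List Char) (pos : Nat) :
    pvMarks cs pos = match pvFirstOcc cs pos with
      | none => [] | some j => j :: pvMarks cs (j + 8) := by
  rw [pvMarks]
  cases hocc : pvFirstOcc cs pos <;> simp

def pvEveryOther : List Int → List Int
  | [] => []
  | [a] => [a]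
  | a :: _ :: t => a :: pvEveryOther t

def pvPairUp : List Int → List (Int × Int)
  | a :: b :: t => (a, b + 8) :: pvPairUp t
  | _ => []

lemma pvEveryOther_cons (x : Int) (t : List Int) :
    pvEveryOther (x :: t) = x :: pvEveryOther t.tail := by
  cases t <;> simp [pvEveryOther]

lemma pvZipPair (l : List Int) :
    ((pvEveryOther l).zip (pvEveryOther l.tail)).map (fun p => (p.1, p.2 + (8 : Int))) = pvPairUp l := by
  induction l using pvEveryOther.induct with
  | case1 => simp [pvEveryOther, pvPairUp]
  | case2 a => simp [pvEveryOther, pvPairUp]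
  | case3 a b t ih =>
    simp only [pvEveryOther_cons, List.tail_cons, List.zip_cons_cons, List.map_cons, pvPairUp]
    exact congrArg _ ih

-- slice lemmas

lemma pvGather0 (l : List Int) :
    (List.range ((l.length + 1) / 2)).filterMap (fun k => l[2 * k]?) = pvEveryOther l := by
  induction l using pvEveryOther.induct with
  | case1 => simp [pvEveryOther]
  | case2 a => simp [pvEveryOther]
  | case3 a b t ih =>
    have : (a :: b :: t).length + 1 = t.length + 3 := by simp
    rw [this, show (t.length + 3) / 2 = (t.length + 1) / 2 + 1 from by omega]
    rw [List.range_succ_eq_map]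
    simp only [List.filterMap_cons, List.filterMap_map]
    have h0 : (a :: b :: t)[2 * 0]? = some a := by simp
    rw [h0]
    have : ∀ k : Nat, (a :: b :: t)[2 * (k + 1)]? = t[2 * k]? := by
      intro k
      rw [show 2 * (k + 1) = 2 * k + 1 + 1 from by omega]
      simp
    simp only [Function.comp_def, this]
    rw [pvEveryOther]
    exact congrArg _ ih

lemma pvGather1 (l : List Int) :
    (List.range (l.length / 2)).filterMap (fun k => l[2 * k + 1]?) = pvEveryOther l.tail := by
  induction l using pvEveryOther.induct with
  | case1 => simp [pvEveryOther]
  | case2 a => simp [pvEveryOther]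
  | case3 a b t ih =>
    rw [show (a :: b :: t).length / 2 = t.length / 2 + 1 from by simp; omega]
    rw [List.range_succ_eq_map]
    simp only [List.filterMap_cons, List.filterMap_map]
    have h0 : (a :: b :: t)[2 * 0 + 1]? = some b := by simp
    rw [h0]
    have : ∀ k : Nat, (a :: b :: t)[2 * (k + 1) + 1]? = t[2 * k + 1]? := by
      intro k
      rw [show 2 * (k + 1) + 1 = 2 * k + 1 + 1 + 1 from by omega]
      simp
    simp only [Function.comp_def, this]
    rw [List.tail_cons, pvEveryOther_cons]
    exact congrArg _ ih

lemma pvSlice0 (l : List Int) : PySem.List.slice? l (some 0) none 2 = some (pvEveryOther l) := by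
  rw [PySem.List.slice?]
  simp only [PySem.List.sliceIndices]
  norm_num
  rw [show (if 0 < l.length then (((l.length:Int) + 2 - 1)/2).toNat else 0) = (l.length + 1)/2 from by
    split <;> omega]
  simp only [show ∀ k : Nat, ((2 * (k:Int)).toNat) = 2*k from fun k => by omega]
  exact pvGather0 l

lemma pvSlice1 (l : List Int) : PySem.List.slice? l (some 1) none 2 = some (pvEveryOther l.tail) := by
  rw [PySem.List.slice?]
  simp only [PySem.List.sliceIndices]
  norm_num
  cases l with
  | nil => simp [pvEveryOther]
  | cons c t =>
    rw [show (min 1 ((c::t).length:Int)) = 1 from by simp]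
    rw [show (if 1 < (c::t).length then ((((c::t).length:Int) - 1 + 2 - 1)/2).toNat else 0) = (c::t).length/2 from by
      split <;> rename_i hsp <;> simp only [List.length_cons] at hsp ⊢ <;> omega]
    simp only [show ∀ k : Nat, ((1 + 2 * (k:Int)).toNat) = 2*k + 1 from fun k => by omega]
    exact pvGather1 (c::t)

lemma pvFoldl_app (xs : List (Int × Int)) (acc : List (Int × Int)) :
    List.foldl (fun spans p => spans ++ [(p.1, p.2 + (8 : Int))]) acc xs
      = acc ++ xs.map (fun p => (p.1, p.2 + 8)) := by
  induction xs generalizing acc with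
  | nil => simp
  | cons x t ih => simp [List.foldl, ih]

lemma pvMarks_shift (cs : List Char) (pos : Nat) (hp : ¬ pvTok <+: cs.drop pos)
    (hlt : pos < cs.length) : pvMarks cs pos = pvMarks cs (pos + 1) := by
  rw [pvMarks_eq, pvMarks_eq, pvFirstOcc, if_neg hp, if_pos hlt]

lemma pvAGo_eq (s : String) (fuel pos : Nat) (marks : List Int)
    (h1 : pos ≤ s.toList.length) (h2 : s.toList.length - pos < 8 * fuel) :
    pvAGo s "<|psep|>" 8 fuel (pos : Int) marks
      = marks ++ (pvMarks s.toList pos).map (fun j => (j : Int)) := by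
  induction fuel generalizing pos marks with
  | zero => omega
  | succ f ih =>
    rw [pvAGo]
    simp only [PySem.Str.findFrom_eq]
    rw [show "<|psep|>".toList = pvTok from rfl, pvFindFrom_eq s.toList pos h1]
    cases hocc : pvFirstOcc s.toList pos with
    | none => simp [pvMarks_eq, hocc]
    | some j =>
      obtain ⟨hpj, hpre, _⟩ := pvFirstOcc_some hocc
      have hj8 : j + 8 ≤ s.toList.length := pvOcc_len hpre
      simp only
      rw [if_neg (by omega : ¬ ((j : Int)) = -1)]
      rw [show ((j : Int) + 8) = (((j + 8 : Nat) : Int)) from by push_cast; ring]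
      rw [ih (j + 8) (marks ++ [(j : Int)]) (by omega) (by omega)]
      rw [pvMarks_eq s.toList pos, hocc]
      simp

lemma pvBGo_eq (cs : List Char) (pos : Nat) (start : Option Nat) (spans : List (Int × Int)) :
    pvBGo cs pos start spans = spans ++
      (match start with
       | none => pvPairUp ((pvMarks cs pos).map (fun j => (j : Int)))
       | some a => match pvMarks cs pos with
         | [] => []
         | m :: rest => ((a : Int), (m : Int) + 8) :: pvPairUp (rest.map (fun j => (j : Int)))) := by
  induction pos, start, spans using pvBGo.induct cs with
  | case1 i spans h hsw ih =>
    have hp : pvTok <+: cs.drop i := (PySem.Chars.startswith_iff _ _).mp hsw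
    have hocc : pvFirstOcc cs i = some i := by rw [pvFirstOcc, if_pos hp]
    rw [pvBGo, dif_pos h, if_pos hsw]
    rw [ih, pvMarks_eq cs i, hocc]
    cases hm : pvMarks cs (i + 8) with
    | nil => simp [hm, pvPairUp]
    | cons m rest => simp [hm, pvPairUp]
  | case2 i spans h hsw a ih =>
    have hp : pvTok <+: cs.drop i := (PySem.Chars.startswith_iff _ _).mp hsw
    have hocc : pvFirstOcc cs i = some i := by rw [pvFirstOcc, if_pos hp]
    rw [pvBGo, dif_pos h, if_pos hsw]
    rw [ih, pvMarks_eq cs i, hocc]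
    simp
  | case3 i start spans h hsw ih =>
    have hp : ¬ pvTok <+: cs.drop i := by
      intro hp; exact hsw ((PySem.Chars.startswith_iff _ _).mpr hp)
    rw [pvBGo.eq_def]
    rw [dif_pos h, if_neg hsw, ih, pvMarks_shift cs i hp (by omega)]
  | case4 i start spans h =>
    have hocc : pvFirstOcc cs i = none := by
      cases hc : pvFirstOcc cs i with
      | none => rfl
      | some j =>
        obtain ⟨hij, hpre, -⟩ := pvFirstOcc_some hc
        have := pvOcc_len hpre
        omega
    rw [pvBGo.eq_def]
    rw [dif_neg h, pvMarks_eq cs i, hocc]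
    cases start <;> simp [pvPairUp]

-- ===== VERDICT (by name: the statement is the Claim_ definition above) =====
theorem iter_span_char_ranges_from_user_blob_spec : Claim_equal_iter_span_char_ranges_from_user_blob := by
  intro s _
  unfold Spec_iter_span_char_ranges_from_user_blob
  simp only [iter_span_char_ranges_from_user_blob, iter_span_char_ranges_from_user_blob_alt]
  have hL : PySem.Str.len "<|psep|>" = 8 := by decide
  have hmarks : pvAGo s "<|psep|>" ((PySem.Str.len "<|psep|>" : Int)) (s.toList.length + 1) 0 []
      = (pvMarks s.toList 0).map (fun j => (j : Int)) := by
    have := pvAGo_eq s (s.toList.length + 1) 0 [] (by omega) (by omega)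
    simpa [hL] using this
  rw [hmarks, pvSlice0, pvSlice1]
  simp only [Option.getD_some, hL]
  rw [pvFoldl_app, pvZipPair]
  rw [pvBGo_eq s.toList 0 none []]
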